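-- pv_equiv track=rewrite | github.com/byung-u/HackerRank | ProjectEuler_plus/euler_037.py | is_truncable_prime
-- ===== SOURCE A (Python) =====
-- def is_prime(n):
--     if n == 2:
--         return True
--     if not n & 1:
--         return False
--
--     return pow(n - 2, n - 1, n) == 1
--
-- def is_truncable_prime(prime):
--     n = 1
--     while (1):
--         div, mod = divmod(prime, pow(10, n))
--         if div == 0:
--             return True
--         if is_prime(div) is False:
--             return False
--         if is_prime(mod) is False:
--             return False
--         n += 1
--     return True
-- ===== SOURCE B (Python) =====
-- def is_prime(n):
--     if n == 2:
--         return True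
--     if not n & 1:
--         return False
--
--     return pow(n - 2, n - 1, n) == 1
--
--
-- def is_truncable_prime(prime):
--     if prime < 0:
--         return False
--     digits = []
--     q = prime
--     while q > 0:
--         digits.append(q % 10)
--         q //= 10
--
--     def val(ds):  # value of a little-endian digit list
--         v = 0
--         for d in reversed(ds):
--             v = v * 10 + d
--         return v
--
--     return all(is_prime(val(digits[k:])) and is_prime(val(digits[:k]))
--                for k in range(1, len(digits)))
-- ===== Notes on version B (the rewrite author's own statement) =====
-- stated objective: alternative
-- what changed: B extracts the decimal digit list once and tests every prefix/suffix split of it via Horner re-evaluation and all() over range(1, len(digits)), instead of A's unbounded while loop peeling the number with divmod by growing powers of ten; negatives are rejected up front instead of falling through a Fermat test with negative modulus.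
import Mathlib
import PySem

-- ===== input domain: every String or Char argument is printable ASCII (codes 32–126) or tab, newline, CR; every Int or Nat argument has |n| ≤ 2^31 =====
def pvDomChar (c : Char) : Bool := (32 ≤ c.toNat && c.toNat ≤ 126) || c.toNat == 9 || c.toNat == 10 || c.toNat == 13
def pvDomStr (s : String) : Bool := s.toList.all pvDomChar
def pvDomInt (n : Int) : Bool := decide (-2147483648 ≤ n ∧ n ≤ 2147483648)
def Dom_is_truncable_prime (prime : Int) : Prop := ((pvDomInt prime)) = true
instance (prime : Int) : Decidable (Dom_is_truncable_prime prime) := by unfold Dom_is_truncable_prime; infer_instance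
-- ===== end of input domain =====

-- B replaces A's unbounded divmod-by-powers-of-ten peeling loop by extracting the decimal digit list once and
-- testing every prefix/suffix split of it (objective: alternative decomposition, same cost).

-- ===== PORT A =====
-- pow(b, e, m): exact via PySem.Int.powMod for e ≥ 0.  For e < 0 Python first inverts b modulo m;
-- in this program that branch is reached only with m < 0 (odd negative n in is_prime), where the
-- result is 'mod _ m' of the inverse power — we compute the inverse via the extended Euclid
-- coefficient Nat.gcdA.  The final residue is taken with 'mod _ m' exactly as Python does, which is
-- all the surrounding '== 1' test can observe (for m < 0 the residue lies in (m, 0]).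
def pyPow (b e m : Int) : Int :=
  if 0 ≤ e then PySem.Int.powMod b e.toNat m
  else PySem.Int.mod ((PySem.Int.mod (Nat.gcdA (PySem.Int.mod b m).natAbs m.natAbs) m) ^ (-e).toNat) m

def is_prime (n : Int) : Bool :=
  if n == 2 then true
  else if PySem.Int.band n 1 == 0 then false
  else pyPow (n - 2) (n - 1) n == 1

-- the while-loop of A; the fuel argument only totalizes the recursion (fuel 0 returns the loop's
-- dead trailing 'return True'; with the fuel supplied below it is never reached on any input,
-- see lemma pyDigits_length_le / is_prime_of_neg)
def loopA (prime : Int) : Nat → Nat → Bool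
  | 0, _ => true
  | fuel+1, n =>
    let div := PySem.Int.floordiv prime ((10 : Int) ^ n)
    let md := PySem.Int.mod prime ((10 : Int) ^ n)
    if div == 0 then true
    else if is_prime div == false then false
    else if is_prime md == false then false
    else loopA prime fuel (n + 1)

def is_truncable_prime (prime : Int) : Bool := loopA prime (prime.natAbs + 1) 1

-- ===== PORT B =====
-- digits = []; while q > 0: digits.append(q % 10); q //= 10   (little-endian digit list)
def pyDigits (q : Int) : List Int :=
  if h : 0 < q then PySem.Int.mod q 10 :: pyDigits (PySem.Int.floordiv q 10)
  else []
termination_by q.toNat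
decreasing_by
  have h1 : PySem.Int.floordiv q 10 < q :=
    (PySem.Int.floordiv_lt_iff_lt_mul (by norm_num)).mpr (by linarith)
  omega

-- def val(ds): v = 0; for d in reversed(ds): v = v*10 + d; return v
def bval (ds : List Int) : Int := ds.reverse.foldl (fun v d => v * 10 + d) 0

def is_truncable_prime_alt (prime : Int) : Bool :=
  if prime < 0 then false
  else
    let digits := pyDigits prime
    (PySem.List.pyRange 1 (PySem.List.len digits) 1).all fun k =>
      is_prime (bval (PySem.List.slice digits (some k) none)) &&
      is_prime (bval (PySem.List.slice digits none (some k)))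

-- ===== PRECONDITION & SPEC =====
def Spec_is_truncable_prime (prime : Int) (out : Bool) : Prop := out = is_truncable_prime_alt prime
instance (prime : Int) (out : Bool) : Decidable (Spec_is_truncable_prime prime out) := by unfold Spec_is_truncable_prime; infer_instance

-- ===== CLAIM (what is proved, stated in full; the proofs are below) =====
def Claim_equal_is_truncable_prime : Prop := ∀ (prime : Int), Dom_is_truncable_prime prime → Spec_is_truncable_prime prime (is_truncable_prime prime)

-- ===== LEMMAS AND PROOFS =====

-- the common per-split check
def checkP (prime : Int) (j : Nat) : Bool :=
  is_prime (PySem.Int.floordiv prime ((10 : Int) ^ j)) && is_prime (PySem.Int.mod prime ((10 : Int) ^ j))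

theorem mod_neg_ne_one (a m : Int) (h : m < 0) : (PySem.Int.mod a m == 1) = false := by
  have := PySem.Int.mod_neg_bounds a h
  simp only [beq_eq_false_iff_ne, ne_eq]
  omega

theorem is_prime_of_neg (n : Int) (h : n < 0) : is_prime n = false := by
  rw [is_prime, if_neg (by simp only [beq_iff_eq]; omega : ¬ ((n == 2) = true))]
  by_cases hb : (PySem.Int.band n 1 == 0) = true
  · rw [if_pos hb]
  · rw [if_neg hb, pyPow, if_neg (by omega : ¬ (0 ≤ n - 1))]
    exact mod_neg_ne_one _ _ h

theorem bval_cons (d : Int) (ds : List Int) : bval (d :: ds) = bval ds * 10 + d := by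
  simp [bval, List.reverse_cons, List.foldl_append]

theorem bval_pyDigits (q : Int) (h : 0 ≤ q) : bval (pyDigits q) = q := by
  induction q using pyDigits.induct with
  | case1 q hq ih =>
    rw [pyDigits, dif_pos hq, bval_cons,
      ih (by rw [PySem.Int.floordiv_eq_ediv_of_pos (by norm_num)]; exact Int.ediv_nonneg hq.le (by norm_num))]
    rw [PySem.Int.floordiv_eq_ediv_of_pos (by norm_num), PySem.Int.mod_eq_emod_of_pos (by norm_num)]
    have := Int.mul_ediv_add_emod q 10
    omega
  | case2 q hq =>
    rw [pyDigits, dif_neg hq]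
    simp only [bval, List.reverse_nil, List.foldl_nil]
    omega

theorem floordiv_ten_nonneg (q : Int) (h : 0 ≤ q) : 0 ≤ PySem.Int.floordiv q 10 := by
  rw [PySem.Int.floordiv_eq_ediv_of_pos (by norm_num)]
  exact Int.ediv_nonneg h (by norm_num)

theorem ediv_pow_succ (q : Int) (n : Nat) :
    q / 10 ^ (n + 1) = (PySem.Int.floordiv q 10) / 10 ^ n := by
  rw [PySem.Int.floordiv_eq_ediv_of_pos (by norm_num),
    Int.ediv_ediv_of_nonneg (by norm_num : (0:Int) ≤ 10)]
  norm_num [pow_succ, mul_comm]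

theorem pyDigits_len_iff (q : Int) (h : 0 ≤ q) :
    ∀ n : Nat, q / 10 ^ n = 0 ↔ (pyDigits q).length ≤ n := by
  induction q using pyDigits.induct with
  | case1 q hq ih =>
    intro n
    rw [pyDigits, dif_pos hq]
    cases n with
    | zero =>
      simp only [pow_zero, Int.ediv_one, List.length_cons]
      omega
    | succ n =>
      rw [ediv_pow_succ]
      rw [ih (floordiv_ten_nonneg q hq.le) n]
      simp only [List.length_cons]
      omega
  | case2 q hq =>
    intro n
    have hq0 : q = 0 := by omega
    subst hq0
    rw [pyDigits]
    simp

theorem pyDigits_length_le (q : Int) (h : 0 ≤ q) : (pyDigits q).length ≤ q.natAbs + 1 := by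
  induction q using pyDigits.induct with
  | case1 q hq ih =>
    rw [pyDigits, dif_pos hq]
    have h1 : PySem.Int.floordiv q 10 < q :=
      (PySem.Int.floordiv_lt_iff_lt_mul (by norm_num)).mpr (by linarith)
    have h2 : 0 ≤ PySem.Int.floordiv q 10 := floordiv_ten_nonneg q hq.le
    have := ih h2
    simp only [List.length_cons]
    omega
  | case2 q hq =>
    rw [pyDigits, dif_neg hq]
    simp

theorem split_digits (k : Nat) : ∀ q : Int, 0 ≤ q →
    bval ((pyDigits q).drop k) = q / 10 ^ k ∧ bval ((pyDigits q).take k) = q % 10 ^ k := by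
  induction k with
  | zero =>
    intro q h
    simp only [List.drop_zero, List.take_zero, pow_zero, Int.ediv_one, Int.emod_one]
    exact ⟨bval_pyDigits q h, by simp [bval]⟩
  | succ k ih =>
    intro q h
    by_cases hq : 0 < q
    · have hq' : 0 ≤ PySem.Int.floordiv q 10 := floordiv_ten_nonneg q h
      obtain ⟨ih1, ih2⟩ := ih (PySem.Int.floordiv q 10) hq'
      rw [pyDigits, dif_pos hq]
      constructor
      · rw [List.drop_succ_cons, ih1, ediv_pow_succ]
      · rw [List.take_succ_cons, bval_cons, ih2]
        -- arithmetic: q % 10^(k+1) = (q//10 % 10^k) * 10 + q % 10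
        have e10 : PySem.Int.floordiv q 10 = q / 10 :=
          PySem.Int.floordiv_eq_ediv_of_pos (by norm_num)
        have em : PySem.Int.mod q 10 = q % 10 :=
          PySem.Int.mod_eq_emod_of_pos (by norm_num)
        have h1 : (10:Int) * (q / 10) + q % 10 = q := Int.mul_ediv_add_emod q 10
        have h2 : (10:Int) ^ k * ((q / 10) / 10 ^ k) + (q / 10) % 10 ^ k = q / 10 :=
          Int.mul_ediv_add_emod _ _
        have h3 : (10:Int) ^ (k+1) * (q / 10 ^ (k+1)) + q % 10 ^ (k+1) = q :=
          Int.mul_ediv_add_emod _ _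
        have h4 : q / 10 ^ (k+1) = (q / 10) / 10 ^ k := by
          rw [ediv_pow_succ, e10]
        have hp : (10:Int) ^ (k+1) = 10 * 10 ^ k := by ring
        rw [e10, em]
        rw [h4] at h3
        linear_combination h1 - h3 + 10 * h2
    · have hq0 : q = 0 := by omega
      subst hq0
      rw [pyDigits, dif_neg hq]
      simp [bval]

theorem loopA_eq (prime : Int) (h : 0 ≤ prime) :
    ∀ (fuel n : Nat), (pyDigits prime).length ≤ n + fuel →
      loopA prime fuel n = ((List.range' n ((pyDigits prime).length - n)).all (checkP prime)) := by
  intro fuel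
  induction fuel with
  | zero =>
    intro n hn
    have h0 : (pyDigits prime).length - n = 0 := by omega
    rw [h0]
    rfl
  | succ fuel ih =>
    intro n hn
    have hfd : PySem.Int.floordiv prime ((10:Int) ^ n) = prime / 10 ^ n :=
      PySem.Int.floordiv_eq_ediv_of_pos (by positivity)
    have hfm : PySem.Int.mod prime ((10:Int) ^ n) = prime % 10 ^ n :=
      PySem.Int.mod_eq_emod_of_pos (by positivity)
    by_cases hd : prime / 10 ^ n = 0
    · have hlen : (pyDigits prime).length ≤ n := (pyDigits_len_iff prime h n).mp hd
      have h0 : (pyDigits prime).length - n = 0 := by omega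
      rw [h0]
      simp only [loopA]
      rw [hfd, if_pos (by simp [hd])]
      rfl
    · have hlen : ¬ (pyDigits prime).length ≤ n := fun hc => hd ((pyDigits_len_iff prime h n).mpr hc)
      have hsub : (pyDigits prime).length - n = ((pyDigits prime).length - (n + 1)) + 1 := by omega
      rw [hsub, List.range'_succ, List.all_cons]
      simp only [loopA]
      rw [hfd, hfm, if_neg (by simp [hd])]
      rw [ih (n + 1) (by omega)]
      cases hp1 : is_prime (prime / 10 ^ n) <;>
        cases hp2 : is_prime (prime % 10 ^ n) <;>
        simp [checkP, hp1, hp2]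

-- ===== VERDICT (by name: the statement is the Claim_ definition above) =====
theorem is_truncable_prime_spec : Claim_equal_is_truncable_prime := by
  intro prime _
  unfold Spec_is_truncable_prime
  by_cases hneg : prime < 0
  · -- both sides are false: A's first truncation prime // 10 is negative, hence not prime
    simp only [is_truncable_prime_alt]
    rw [if_pos hneg, is_truncable_prime]
    simp only [loopA]
    have hfd : PySem.Int.floordiv prime ((10:Int) ^ 1) = prime / 10 := by
      rw [PySem.Int.floordiv_eq_ediv_of_pos (by norm_num), pow_one]
    have hd0 : prime / 10 < 0 := Int.ediv_neg_of_neg_of_pos hneg (by norm_num)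
    rw [hfd, if_neg (by simp; omega), if_pos (by simp [is_prime_of_neg _ hd0])]
  · have h : 0 ≤ prime := by omega
    simp only [is_truncable_prime_alt]
    rw [if_neg hneg, is_truncable_prime]
    rw [loopA_eq prime h (prime.natAbs + 1) 1
      (by have := pyDigits_length_le prime h; omega)]
    rw [PySem.List.len_eq, PySem.List.pyRange_of_pos _ _ (by norm_num)]
    have hcount :
        (if (1:Int) < ((pyDigits prime).length : Int)
          then ((((pyDigits prime).length : Int) - 1 + 1 - 1) / 1).toNat else 0)
        = (pyDigits prime).length - 1 := by
      split_ifs with hl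
      · rw [Int.ediv_one]
        omega
      · omega
    rw [hcount, List.all_map, List.range'_eq_map_range, List.all_map]
    refine List.all_congr rfl (fun j => ?_)
    have hk : (1 + 1 * (j : Int)) = (((1 + j : Nat) : Int)) := by push_cast; ring
    simp only [Function.comp]
    rw [hk, PySem.List.slice_from_natCast, PySem.List.slice_to_natCast]
    obtain ⟨h1, h2⟩ := split_digits (1 + j) prime h
    rw [h1, h2, checkP,
      PySem.Int.floordiv_eq_ediv_of_pos (by positivity),
      PySem.Int.mod_eq_emod_of_pos (by positivity)]
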